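-- pv_equiv track=rewrite | github.com/litprog/litprog | examples/sudoku.py | shorten_digits
-- ===== SOURCE A (Python) =====
-- def shorten_digits(digits: str) -> str:
--     """Shorten contiguous sequences of digits."""
--     for i in range(8):
--         for j in range(9, i - 1, -1):
--             if j - i < 3:
--                 continue
--             r = "".join(map(str, range(i, j + 1)))
--             if r in digits:
--                 digits = digits.replace(r, r[0] + "-" + r[-1])
--     return digits
-- ===== SOURCE B (Python) =====
-- def shorten_digits(digits: str) -> str:
--     """Shorten contiguous sequences of digits (single linear scan)."""
--     out = []
--     run = ""
--     for c in digits: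
--         if "0" <= c <= "9" and run and ord(c) == ord(run[-1]) + 1:
--             run += c
--         else:
--             out.append(run[0] + "-" + run[-1] if len(run) >= 4 else run)
--             if "0" <= c <= "9":
--                 run = c
--             else:
--                 run = ""
--                 out.append(c)
--     out.append(run[0] + "-" + run[-1] if len(run) >= 4 else run)
--     return "".join(out)
-- ===== Notes on version B (the rewrite author's own statement) =====
-- stated objective: simpler
-- what changed: A enumerates 28 candidate ascending-digit patterns (nested loops over i,j) and calls str.replace for each; B makes one linear scan that collects maximal ascending digit runs and abbreviates runs of length >= 4 in place.
import Mathlib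
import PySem

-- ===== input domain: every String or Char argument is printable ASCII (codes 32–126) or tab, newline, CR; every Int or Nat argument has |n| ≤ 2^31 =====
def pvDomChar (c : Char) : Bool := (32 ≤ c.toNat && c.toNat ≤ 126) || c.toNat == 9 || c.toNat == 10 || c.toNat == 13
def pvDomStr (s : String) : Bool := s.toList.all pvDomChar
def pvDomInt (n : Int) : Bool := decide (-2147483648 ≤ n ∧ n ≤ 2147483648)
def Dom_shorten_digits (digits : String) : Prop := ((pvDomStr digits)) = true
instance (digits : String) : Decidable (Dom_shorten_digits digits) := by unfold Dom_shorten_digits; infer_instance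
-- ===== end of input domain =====

set_option maxRecDepth 40000

-- B replaces A's enumeration of 28 candidate patterns with repeated str.replace by one
-- linear scan that collects maximal ascending digit runs and abbreviates those of length ≥ 4.

-- ===== PORT A =====
-- the body of A's inner loop, as a named helper (same code, same branch order)
def pvBodyA (i j : Int) (ds : List Char) : List Char :=
  if j - i < 3 then ds
  else
    let r := PySem.Chars.join [] ((PySem.List.pyRange i (j + 1) 1).map PySem.Int.toChars)
    if PySem.Chars.isIn r ds then
      match r, r.getLast? with
      | c0 :: _, some cl => PySem.Chars.replace ds r [c0, '-', cl]
      | _, _ => ds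
    else ds

def shorten_digits (digits : String) : String :=
  String.mk <|
    (PySem.List.pyRange 0 8 1).foldl (fun ds i =>
      (PySem.List.pyRange 9 (i - 1) (-1)).foldl (fun ds j => pvBodyA i j ds) ds) digits.toList

-- ===== PORT B =====
def pvIsD (c : Char) : Bool := '0' ≤ c && c ≤ '9'

def pvFlush (run : List Char) : List Char :=
  if 4 ≤ run.length then [run.headD '-', '-', run.getLastD '-'] else run

def pvStepB (st : List (List Char) × List Char) (c : Char) : List (List Char) × List Char :=
  if pvIsD c && (match st.2.getLast? with | some d => c.toNat == d.toNat + 1 | none => false) then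
    (st.1, st.2 ++ [c])
  else if pvIsD c then (st.1 ++ [pvFlush st.2], [c])
  else (st.1 ++ [pvFlush st.2, [c]], [])

def shorten_digits_alt (digits : String) : String :=
  let st := digits.toList.foldl pvStepB ([], [])
  String.mk (st.1 ++ [pvFlush st.2]).flatten

-- ===== PRECONDITION & SPEC =====
def Spec_shorten_digits (digits : String) (out : String) : Prop := out = shorten_digits_alt digits
instance (digits : String) (out : String) : Decidable (Spec_shorten_digits digits out) := by unfold Spec_shorten_digits; infer_instance

-- ===== CLAIM (what is proved, stated in full; the proofs are below) =====
def Claim_equal_shorten_digits : Prop := ∀ (digits : String), Dom_shorten_digits digits → Spec_shorten_digits digits (shorten_digits digits)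

-- ===== LEMMAS AND PROOFS =====

-- the 28 (i, j) pairs A's loops visit with j - i ≥ 3, in A's processing order

def pvStepsIdx : List (Nat × Nat) := [(0, 9), (0, 8), (0, 7), (0, 6), (0, 5), (0, 4), (0, 3), (1, 9), (1, 8), (1, 7), (1, 6), (1, 5), (1, 4), (2, 9), (2, 8), (2, 7), (2, 6), (2, 5), (3, 9), (3, 8), (3, 7), (3, 6), (4, 9), (4, 8), (4, 7), (5, 9), (5, 8), (6, 9)]

-- ascending digit-run string i…j and its abbreviation, for an index pair
def pvAsc (a len : Nat) : List Char := (List.range len).map (fun k => Char.ofNat (48 + a + k))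

def pvEntry (e : Nat × Nat) : List Char × List Char :=
  (pvAsc e.1 (e.2 + 1 - e.1), [Char.ofNat (48 + e.1), '-', Char.ofNat (48 + e.2)])

def pvStepsA : List (List Char × List Char) := pvStepsIdx.map pvEntry

def pvStepA (cs : List Char) (pn : List Char × List Char) : List Char :=
  if PySem.Chars.isIn pn.1 cs then PySem.Chars.replace cs pn.1 pn.2 else cs

def pvF (cs : List Char) : List Char := pvStepsA.foldl pvStepA cs

-- A's loop bodies, evaluated at each concrete (i, j)

lemma pvBody_0_2 (ds : List Char) : pvBodyA 0 2 ds = ds := rfl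
lemma pvBody_0_1 (ds : List Char) : pvBodyA 0 1 ds = ds := rfl
lemma pvBody_0_0 (ds : List Char) : pvBodyA 0 0 ds = ds := rfl
lemma pvBody_1_3 (ds : List Char) : pvBodyA 1 3 ds = ds := rfl
lemma pvBody_1_2 (ds : List Char) : pvBodyA 1 2 ds = ds := rfl
lemma pvBody_1_1 (ds : List Char) : pvBodyA 1 1 ds = ds := rfl
lemma pvBody_2_4 (ds : List Char) : pvBodyA 2 4 ds = ds := rfl
lemma pvBody_2_3 (ds : List Char) : pvBodyA 2 3 ds = ds := rfl
lemma pvBody_2_2 (ds : List Char) : pvBodyA 2 2 ds = ds := rfl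
lemma pvBody_3_5 (ds : List Char) : pvBodyA 3 5 ds = ds := rfl
lemma pvBody_3_4 (ds : List Char) : pvBodyA 3 4 ds = ds := rfl
lemma pvBody_3_3 (ds : List Char) : pvBodyA 3 3 ds = ds := rfl
lemma pvBody_4_6 (ds : List Char) : pvBodyA 4 6 ds = ds := rfl
lemma pvBody_4_5 (ds : List Char) : pvBodyA 4 5 ds = ds := rfl
lemma pvBody_4_4 (ds : List Char) : pvBodyA 4 4 ds = ds := rfl
lemma pvBody_5_7 (ds : List Char) : pvBodyA 5 7 ds = ds := rfl
lemma pvBody_5_6 (ds : List Char) : pvBodyA 5 6 ds = ds := rfl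
lemma pvBody_5_5 (ds : List Char) : pvBodyA 5 5 ds = ds := rfl
lemma pvBody_6_8 (ds : List Char) : pvBodyA 6 8 ds = ds := rfl
lemma pvBody_6_7 (ds : List Char) : pvBodyA 6 7 ds = ds := rfl
lemma pvBody_6_6 (ds : List Char) : pvBodyA 6 6 ds = ds := rfl
lemma pvBody_7_9 (ds : List Char) : pvBodyA 7 9 ds = ds := rfl
lemma pvBody_7_8 (ds : List Char) : pvBodyA 7 8 ds = ds := rfl
lemma pvBody_7_7 (ds : List Char) : pvBodyA 7 7 ds = ds := rfl
lemma pvBody_0_9 (ds : List Char) : pvBodyA 0 9 ds = pvStepA ds (pvEntry (0, 9)) := rfl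
lemma pvBody_0_8 (ds : List Char) : pvBodyA 0 8 ds = pvStepA ds (pvEntry (0, 8)) := rfl
lemma pvBody_0_7 (ds : List Char) : pvBodyA 0 7 ds = pvStepA ds (pvEntry (0, 7)) := rfl
lemma pvBody_0_6 (ds : List Char) : pvBodyA 0 6 ds = pvStepA ds (pvEntry (0, 6)) := rfl
lemma pvBody_0_5 (ds : List Char) : pvBodyA 0 5 ds = pvStepA ds (pvEntry (0, 5)) := rfl
lemma pvBody_0_4 (ds : List Char) : pvBodyA 0 4 ds = pvStepA ds (pvEntry (0, 4)) := rfl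
lemma pvBody_0_3 (ds : List Char) : pvBodyA 0 3 ds = pvStepA ds (pvEntry (0, 3)) := rfl
lemma pvBody_1_9 (ds : List Char) : pvBodyA 1 9 ds = pvStepA ds (pvEntry (1, 9)) := rfl
lemma pvBody_1_8 (ds : List Char) : pvBodyA 1 8 ds = pvStepA ds (pvEntry (1, 8)) := rfl
lemma pvBody_1_7 (ds : List Char) : pvBodyA 1 7 ds = pvStepA ds (pvEntry (1, 7)) := rfl
lemma pvBody_1_6 (ds : List Char) : pvBodyA 1 6 ds = pvStepA ds (pvEntry (1, 6)) := rfl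
lemma pvBody_1_5 (ds : List Char) : pvBodyA 1 5 ds = pvStepA ds (pvEntry (1, 5)) := rfl
lemma pvBody_1_4 (ds : List Char) : pvBodyA 1 4 ds = pvStepA ds (pvEntry (1, 4)) := rfl
lemma pvBody_2_9 (ds : List Char) : pvBodyA 2 9 ds = pvStepA ds (pvEntry (2, 9)) := rfl
lemma pvBody_2_8 (ds : List Char) : pvBodyA 2 8 ds = pvStepA ds (pvEntry (2, 8)) := rfl
lemma pvBody_2_7 (ds : List Char) : pvBodyA 2 7 ds = pvStepA ds (pvEntry (2, 7)) := rfl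
lemma pvBody_2_6 (ds : List Char) : pvBodyA 2 6 ds = pvStepA ds (pvEntry (2, 6)) := rfl
lemma pvBody_2_5 (ds : List Char) : pvBodyA 2 5 ds = pvStepA ds (pvEntry (2, 5)) := rfl
lemma pvBody_3_9 (ds : List Char) : pvBodyA 3 9 ds = pvStepA ds (pvEntry (3, 9)) := rfl
lemma pvBody_3_8 (ds : List Char) : pvBodyA 3 8 ds = pvStepA ds (pvEntry (3, 8)) := rfl
lemma pvBody_3_7 (ds : List Char) : pvBodyA 3 7 ds = pvStepA ds (pvEntry (3, 7)) := rfl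
lemma pvBody_3_6 (ds : List Char) : pvBodyA 3 6 ds = pvStepA ds (pvEntry (3, 6)) := rfl
lemma pvBody_4_9 (ds : List Char) : pvBodyA 4 9 ds = pvStepA ds (pvEntry (4, 9)) := rfl
lemma pvBody_4_8 (ds : List Char) : pvBodyA 4 8 ds = pvStepA ds (pvEntry (4, 8)) := rfl
lemma pvBody_4_7 (ds : List Char) : pvBodyA 4 7 ds = pvStepA ds (pvEntry (4, 7)) := rfl
lemma pvBody_5_9 (ds : List Char) : pvBodyA 5 9 ds = pvStepA ds (pvEntry (5, 9)) := rfl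
lemma pvBody_5_8 (ds : List Char) : pvBodyA 5 8 ds = pvStepA ds (pvEntry (5, 8)) := rfl
lemma pvBody_6_9 (ds : List Char) : pvBodyA 6 9 ds = pvStepA ds (pvEntry (6, 9)) := rfl

lemma pvA_eq (s : String) : shorten_digits s = String.mk (pvF s.toList) := by
  rw [shorten_digits]
  rw [show PySem.List.pyRange 0 8 1 = [0, 1, 2, 3, 4, 5, 6, 7] from by decide]
  simp only [List.foldl_cons, List.foldl_nil]

  rw [show PySem.List.pyRange 9 (0 - 1) (-1) = [9, 8, 7, 6, 5, 4, 3, 2, 1, 0] from by decide]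
  rw [show PySem.List.pyRange 9 (1 - 1) (-1) = [9, 8, 7, 6, 5, 4, 3, 2, 1] from by decide]
  rw [show PySem.List.pyRange 9 (2 - 1) (-1) = [9, 8, 7, 6, 5, 4, 3, 2] from by decide]
  rw [show PySem.List.pyRange 9 (3 - 1) (-1) = [9, 8, 7, 6, 5, 4, 3] from by decide]
  rw [show PySem.List.pyRange 9 (4 - 1) (-1) = [9, 8, 7, 6, 5, 4] from by decide]
  rw [show PySem.List.pyRange 9 (5 - 1) (-1) = [9, 8, 7, 6, 5] from by decide]
  rw [show PySem.List.pyRange 9 (6 - 1) (-1) = [9, 8, 7, 6] from by decide]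
  rw [show PySem.List.pyRange 9 (7 - 1) (-1) = [9, 8, 7] from by decide]
  simp only [List.foldl_cons, List.foldl_nil]
  simp only [pvBody_0_9 ,pvBody_0_8 ,pvBody_0_7 ,pvBody_0_6 ,pvBody_0_5 ,pvBody_0_4 ,pvBody_0_3 ,pvBody_0_2 ,pvBody_0_1 ,pvBody_0_0 ,pvBody_1_9 ,pvBody_1_8 ,pvBody_1_7 ,pvBody_1_6 ,pvBody_1_5 ,pvBody_1_4 ,pvBody_1_3 ,pvBody_1_2 ,pvBody_1_1 ,pvBody_2_9 ,pvBody_2_8 ,pvBody_2_7 ,pvBody_2_6 ,pvBody_2_5 ,pvBody_2_4 ,pvBody_2_3 ,pvBody_2_2 ,pvBody_3_9 ,pvBody_3_8 ,pvBody_3_7 ,pvBody_3_6 ,pvBody_3_5 ,pvBody_3_4 ,pvBody_3_3 ,pvBody_4_9 ,pvBody_4_8 ,pvBody_4_7 ,pvBody_4_6 ,pvBody_4_5 ,pvBody_4_4 ,pvBody_5_9 ,pvBody_5_8 ,pvBody_5_7 ,pvBody_5_6 ,pvBody_5_5 ,pvBody_6_9 ,pvBody_6_8 ,pvBody_6_7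 ,pvBody_6_6 ,pvBody_7_9 ,pvBody_7_8 ,pvBody_7_7]
  rw [pvF, pvStepsA, pvStepsIdx]
  simp only [List.map_cons, List.map_nil, List.foldl_cons, List.foldl_nil]

-- clean non-fueled leftmost replace-all
def pvRep (old new : List Char) : List Char → List Char
  | [] => []
  | c :: t =>
    if old.isPrefixOf (c :: t) then new ++ pvRep old new (t.drop (old.length - 1))
    else c :: pvRep old new t
termination_by l => l.length
decreasing_by
  · simp only [List.length_cons]
    have := List.length_drop (l := t) (i := old.length - 1)
    omega
  · simp

lemma pvGo_eq (old new : List Char) (hold : old ≠ []) :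
    ∀ fuel l acc, l.length ≤ fuel →
      PySem.Chars.replace.go old new fuel l acc = acc.reverse ++ pvRep old new l := by
  intro fuel
  induction fuel with
  | zero =>
    intro l acc hl
    have : l = [] := by cases l <;> simp_all
    subst this
    simp [PySem.Chars.replace.go, pvRep]
  | succ n ih =>
    intro l acc hl
    cases l with
    | nil => simp [PySem.Chars.replace.go, pvRep]
    | cons c t =>
      rw [PySem.Chars.replace.go, pvRep]
      have holdlen : 1 ≤ old.length := List.length_pos_iff.mpr hold
      by_cases hp : old.isPrefixOf (c :: t) = true
      · rw [if_pos hp, if_pos hp]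
        have hdrop : List.drop old.length (c :: t) = t.drop (old.length - 1) := by
          obtain ⟨k, hk⟩ : ∃ k, old.length = k + 1 := ⟨old.length - 1, by omega⟩
          rw [hk, List.drop_succ_cons]
          congr 1 <;> omega
        rw [hdrop, ih _ _ (by
          have := List.length_drop (l := t) (i := old.length - 1)
          simp only [List.length_cons] at hl
          omega)]
        simp
      · rw [if_neg hp, if_neg hp, ih t (c :: acc) (by simp only [List.length_cons] at hl; omega)]
        simp

lemma pvReplace_eq_rep (old new s : List Char) (hold : old ≠ []) :
    PySem.Chars.replace s old new = pvRep old new s := by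
  rw [PySem.Chars.replace]
  rw [if_neg (by simpa using hold)]
  simpa using pvGo_eq old new hold s.length s [] le_rfl

lemma pvRep_id (old new : List Char) (s : List Char) (h : ¬ old <:+: s) : pvRep old new s = s := by
  fun_induction pvRep old new s with
  | case1 => rfl
  | case2 c t hp ih =>
    exact absurd (List.isPrefixOf_iff_prefix.mp hp).isInfix h
  | case3 c t hp ih =>
    rw [ih (fun hi => h (List.infix_cons hi))]

lemma pvRep_self (u new : List Char) (hu : u ≠ []) : pvRep u new u = new := by
  cases u with
  | nil => simp at hu
  | cons c t =>
    rw [pvRep, if_pos (List.isPrefixOf_iff_prefix.mpr List.prefix_rfl)]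
    have h1 : t.drop ((c :: t).length - 1) = [] := by
      simp [List.drop_eq_nil_iff]
    rw [h1, pvRep]
    simp

lemma pvStepA_eq_rep (cs : List Char) (pn : List Char × List Char) (h : pn.1 ≠ []) :
    pvStepA cs pn = pvRep pn.1 pn.2 cs := by
  rw [pvStepA]
  by_cases hin : PySem.Chars.isIn pn.1 cs = true
  · rw [if_pos hin, pvReplace_eq_rep _ _ _ h]
  · rw [if_neg hin, pvRep_id]
    exact fun hi => hin ((PySem.Chars.isIn_iff_infix _ _).mpr hi)

lemma pvPrefix_split_le {α : Type} (x y o : List α) (h : o <+: x ++ y) (hl : o.length ≤ x.length) :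
    o <+: x := by
  rw [List.prefix_iff_eq_take] at h ⊢
  rw [h, List.take_append_of_le_length hl]
  rw [List.length_take]
  congr 1
  omega

lemma pvPrefix_split_gt {α : Type} (x y o : List α) (h : o <+: x ++ y) (hl : x.length < o.length) :
    x <+: o ∧ o.drop x.length <+: y := by
  have hx : x = o.take x.length := by
    rw [List.prefix_iff_eq_take] at h
    rw [h, List.take_take, min_eq_left (le_of_lt hl), List.take_append_of_le_length le_rfl,
      List.take_length]
  have hxo : x <+: o := by rw [hx]; exact List.take_prefix _ _
  refine ⟨hxo, ?_⟩
  obtain ⟨r, hr⟩ := h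
  obtain ⟨d, hd⟩ := hxo
  have hdrop : o.drop x.length = d := by
    rw [← hd, List.drop_append_of_le_length le_rfl, List.drop_length, List.nil_append]
  rw [hdrop]
  refine ⟨r, ?_⟩
  have : x ++ (d ++ r) = x ++ y := by
    rw [← List.append_assoc, hd, hr]
  exact (List.append_cancel_left this)

lemma pvRep_append (old new : List Char) (hold : old ≠ []) :
    ∀ x y : List Char,
    (∀ s : List Char, s <:+ x → s ≠ [] → s.length < old.length → s <+: old →
        ¬ (old.drop s.length <+: y)) →
    pvRep old new (x ++ y) = pvRep old new x ++ pvRep old new y := by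
  have holdlen : 1 ≤ old.length := List.length_pos_iff.mpr hold
  suffices H : ∀ n (x y : List Char), x.length = n →
      (∀ s : List Char, s <:+ x → s ≠ [] → s.length < old.length → s <+: old →
        ¬ (old.drop s.length <+: y)) →
      pvRep old new (x ++ y) = pvRep old new x ++ pvRep old new y by
    intro x y h
    exact H x.length x y rfl h
  intro n
  induction n using Nat.strong_induction_on with
  | _ n ih =>
    intro x y hn hcr
    cases x with
    | nil => simp [pvRep]
    | cons c t =>
      by_cases hp : old.isPrefixOf (c :: (t ++ y)) = true
      · have hp' : old <+: (c :: t) ++ y := by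
          simpa using List.isPrefixOf_iff_prefix.mp hp
        have hple : old.length ≤ (c :: t).length := by
          by_contra hgt
          push_neg at hgt
          obtain ⟨h1, h2⟩ := pvPrefix_split_gt _ _ _ hp' hgt
          exact hcr (c :: t) List.suffix_rfl (by simp) hgt h1 h2
        have hpx : old <+: (c :: t) := pvPrefix_split_le _ _ _ hp' hple
        have hpxb : old.isPrefixOf (c :: t) = true := List.isPrefixOf_iff_prefix.mpr hpx
        show pvRep old new (c :: (t ++ y)) = pvRep old new (c :: t) ++ pvRep old new y
        rw [pvRep, pvRep, if_pos hp, if_pos hpxb]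
        have hdr : (t ++ y).drop (old.length - 1) = t.drop (old.length - 1) ++ y :=
          List.drop_append_of_le_length (by simp at hple; omega)
        rw [hdr]
        rw [ih (t.drop (old.length - 1)).length
            (by rw [List.length_drop]; simp only [List.length_cons] at hn; omega)
            _ y rfl
            (fun s hs hne hlen hpre =>
              hcr s (hs.trans ((List.drop_suffix _ _).trans (List.suffix_cons _ _)))
                hne hlen hpre)]
        simp [List.append_assoc]
      · have hpx : ¬ old.isPrefixOf (c :: t) = true := by
          intro hb
          exact hp (List.isPrefixOf_iff_prefix.mpr
            (by simpa using (List.isPrefixOf_iff_prefix.mp hb).trans (List.prefix_append _ y)))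
        show pvRep old new (c :: (t ++ y)) = pvRep old new (c :: t) ++ pvRep old new y
        rw [pvRep, pvRep, if_neg hp, if_neg hpx]
        rw [ih t.length (by simp [hn.symm]) t y rfl
            (fun s hs hne hlen hpre => hcr s (hs.trans (List.suffix_cons _ _)) hne hlen hpre)]
        simp

lemma pvHead?_of_prefix {α : Type} (o s : List α) (ho : o ≠ []) (h : o <+: s) :
    s.head? = o.head? := by
  obtain ⟨r, hr⟩ := h
  rw [← hr, List.head?_append]
  cases o with
  | nil => simp at ho
  | cons a b => rfl

lemma pvRep_head? (old new s : List Char) (hold : old ≠ []) (hnew : new ≠ [])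
    (hh : new.head? = old.head?) : (pvRep old new s).head? = s.head? := by
  cases s with
  | nil => simp [pvRep]
  | cons c t =>
    rw [pvRep]
    by_cases hp : old.isPrefixOf (c :: t) = true
    · rw [if_pos hp, List.head?_append, hh,
        ← pvHead?_of_prefix old (c :: t) hold (List.isPrefixOf_iff_prefix.mp hp)]
      cases new with
      | nil => simp at hnew
      | cons a b => rfl
    · rw [if_neg hp]
      rfl

lemma pvGetLast?_of_suffix {α : Type} (o s : List α) (ho : o ≠ []) (h : o <:+ s) :
    s.getLast? = o.getLast? := by
  obtain ⟨r, hr⟩ := h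
  rw [← hr, List.getLast?_append]
  cases hlast : o.getLast? with
  | none =>
    simp only [List.getLast?_eq_none_iff] at hlast
    exact absurd hlast ho
  | some a => rfl

lemma pvRep_last? (old new s : List Char) (hold : old ≠ []) (hnew : new ≠ [])
    (hl : new.getLast? = old.getLast?) : (pvRep old new s).getLast? = s.getLast? := by
  fun_induction pvRep old new s with
  | case1 => rfl
  | case2 c t hp ih =>
    rw [List.getLast?_append, ih]
    rcases Decidable.em (t.drop (old.length - 1) = []) with hnil | hne
    · rw [hnil]
      have hso : old = c :: t := by
        have hple := (List.isPrefixOf_iff_prefix.mp hp).length_le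
        have hlen : (c :: t).length ≤ old.length := by
          simp only [List.drop_eq_nil_iff] at hnil
          simp only [List.length_cons]
          have holdlen : 1 ≤ old.length := List.length_pos_iff.mpr hold
          omega
        have := List.prefix_iff_eq_take.mp (List.isPrefixOf_iff_prefix.mp hp)
        rw [this, List.take_of_length_le hlen]
      rw [hso] at hl
      simp [hl]
    · have hdropsuff : t.drop (old.length - 1) <:+ (c :: t) :=
        (List.drop_suffix _ _).trans (List.suffix_cons _ _)
      rw [pvGetLast?_of_suffix _ _ hne hdropsuff]
      cases hlast : (t.drop (old.length - 1)).getLast? with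
      | none =>
        simp only [List.getLast?_eq_none_iff] at hlast
        exact absurd hlast hne
      | some a => rfl
  | case3 c t hp ih =>
    show ([c] ++ pvRep old new t).getLast? = ([c] ++ t).getLast?
    rw [List.getLast?_append, List.getLast?_append, ih]

def pvChainD (p : List Char) : Prop :=
  (∀ c ∈ p, pvIsD c) ∧ p.IsChain (fun a b => b.toNat = a.toNat + 1)

def pvGood (pn : List Char × List Char) : Prop :=
  pn.1 ≠ [] ∧ pn.2 ≠ [] ∧ pn.2.head? = pn.1.head? ∧ pn.2.getLast? = pn.1.getLast? ∧
  4 ≤ pn.1.length ∧ pvChainD pn.1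

abbrev pvLexLt (p q : Nat × Nat) : Prop := p.1 < q.1 ∨ (p.1 = q.1 ∧ q.2 < p.2)

abbrev pvWf (p : Nat × Nat) : Prop := p.1 + 3 ≤ p.2 ∧ p.2 ≤ 9

def pvBnd (x y : List Char) : Prop :=
  ∀ c d, x.getLast? = some c → y.head? = some d → pvIsD c → pvIsD d → c.toNat + 1 ≠ d.toNat

lemma pvNoCross (p x y : List Char) (hch : pvChainD p) (hb : pvBnd x y) :
    ∀ s : List Char, s <:+ x → s ≠ [] → s.length < p.length → s <+: p →
      ¬ (p.drop s.length <+: y) := by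
  intro s hsx hne hlen hsp hdy
  have hn1 : 1 ≤ s.length := List.length_pos_iff.mpr hne
  have hxl : x.getLast? = s.getLast? := pvGetLast?_of_suffix s x hne hsx
  have hslast : s.getLast? = p[s.length - 1]? := by
    conv_lhs => rw [List.prefix_iff_eq_take.mp hsp]
    rw [List.getLast?_eq_getElem?, List.length_take, List.getElem?_take]
    have hmin : min s.length p.length = s.length := by omega
    rw [hmin, if_pos (by omega)]
  have hdne : p.drop s.length ≠ [] := by
    simp only [ne_eq, List.drop_eq_nil_iff]
    omega
  have hyh : y.head? = (p.drop s.length).head? := pvHead?_of_prefix _ y hdne hdy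
  have hdh : (p.drop s.length).head? = p[s.length]? := by
    rw [List.head?_eq_getElem?, List.getElem?_drop]
    norm_num
  have hc : p[s.length - 1]?.isSome := by
    rw [List.getElem?_eq_getElem (by omega)]
    rfl
  obtain ⟨k, hk⟩ : ∃ k, s.length = k + 1 := ⟨s.length - 1, by omega⟩
  have hgc : x.getLast? = some (p[k]'(by omega)) := by
    rw [hxl, hslast, hk]
    simp [List.getElem?_eq_getElem (show k < p.length by omega)]
  have hgd : y.head? = some (p[k + 1]'(by omega)) := by
    rw [hyh, hdh, hk]
    simp [List.getElem?_eq_getElem (show k + 1 < p.length by omega)]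
  have hchain := List.isChain_iff_getElem.mp hch.2 k (by omega)
  exact hb _ _ hgc hgd
    (hch.1 _ (List.getElem_mem _)) (hch.1 _ (List.getElem_mem _)) (by omega)

lemma pvFoldl_append (ps : List (List Char × List Char)) (hgood : ∀ pn ∈ ps, pvGood pn) :
    ∀ x y : List Char, pvBnd x y →
      ps.foldl pvStepA (x ++ y) = ps.foldl pvStepA x ++ ps.foldl pvStepA y := by
  induction ps with
  | nil => intro x y _; rfl
  | cons pn ps ih =>
    intro x y hb
    obtain ⟨h1, h2, h3, h4, h5, h6⟩ := hgood pn List.mem_cons_self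
    simp only [List.foldl_cons]
    rw [pvStepA_eq_rep _ _ h1, pvStepA_eq_rep _ _ h1, pvStepA_eq_rep _ _ h1,
      pvRep_append pn.1 pn.2 h1 x y (pvNoCross pn.1 x y h6 hb)]
    refine ih (fun q hq => hgood q (List.mem_cons_of_mem _ hq)) _ _ ?_
    intro c d hc hd hic hid
    rw [pvRep_last? _ _ _ h1 h2 h4] at hc
    rw [pvRep_head? _ _ _ h1 h2 h3] at hd
    exact hb c d hc hd hic hid

lemma pvFoldl_small (ps : List (List Char × List Char)) (hlen : ∀ pn ∈ ps, 4 ≤ pn.1.length) :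
    ∀ s : List Char, s.length < 4 → ps.foldl pvStepA s = s := by
  induction ps with
  | nil => intro s _; rfl
  | cons pn ps ih =>
    intro s hs
    simp only [List.foldl_cons]
    have hstep : pvStepA s pn = s := by
      rw [pvStepA, if_neg]
      intro hin
      have := ((PySem.Chars.isIn_iff_infix _ _).mp hin).length_le
      have := hlen pn List.mem_cons_self
      omega
    rw [hstep]
    exact ih (fun q hq => hlen q (List.mem_cons_of_mem _ hq)) s hs

lemma pvAsc_length (a len : Nat) : (pvAsc a len).length = len := by simp [pvAsc]

lemma pvChar_toNat_ofNat (n : Nat) (h : n ≤ 57) : (Char.ofNat n).toNat = n := by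
  have hv : n.isValidChar := Or.inl (by omega)
  rw [Char.ofNat, dif_pos hv]
  rfl

lemma pvIsD_iff (c : Char) : pvIsD c = true ↔ 48 ≤ c.toNat ∧ c.toNat ≤ 57 := by
  rw [pvIsD, Bool.and_eq_true, decide_eq_true_iff, decide_eq_true_iff,
    Char.le_def, Char.le_def, UInt32.le_iff_toNat_le, UInt32.le_iff_toNat_le]
  constructor
  · rintro ⟨h1, h2⟩; exact ⟨h1, h2⟩
  · rintro ⟨h1, h2⟩; exact ⟨h1, h2⟩

lemma pvAsc_getElem? (a len k : Nat) (hk : k < len) :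
    (pvAsc a len)[k]? = some (Char.ofNat (48 + a + k)) := by
  simp [pvAsc, List.getElem?_map, List.getElem?_range, hk]

lemma pvAsc_head? (a len : Nat) (h : 1 ≤ len) :
    (pvAsc a len).head? = some (Char.ofNat (48 + a)) := by
  rw [List.head?_eq_getElem?, pvAsc_getElem? a len 0 (by omega)]
  norm_num

lemma pvAsc_last? (a len : Nat) (h : 1 ≤ len) :
    (pvAsc a len).getLast? = some (Char.ofNat (48 + a + (len - 1))) := by
  rw [List.getLast?_eq_getElem?, pvAsc_length, pvAsc_getElem? a len (len - 1) (by omega)]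

lemma pvAsc_ne_nil (a len : Nat) (h : 1 ≤ len) : pvAsc a len ≠ [] := by
  intro hc
  have := pvAsc_length a len
  rw [hc] at this
  simp at this
  omega

lemma pvAsc_chain (a len : Nat) (h : a + len ≤ 10) : pvChainD (pvAsc a len) := by
  constructor
  · intro c hc
    simp only [pvAsc, List.mem_map, List.mem_range] at hc
    obtain ⟨k, hk, rfl⟩ := hc
    rw [pvIsD_iff, pvChar_toNat_ofNat _ (by omega)]
    omega
  · rw [List.isChain_iff_getElem]
    intro i hi
    rw [pvAsc_length] at hi
    simp only [pvAsc, List.getElem_map, List.getElem_range]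
    rw [pvChar_toNat_ofNat _ (by omega), pvChar_toNat_ofNat _ (by omega)]
    omega

lemma pvChain_eq_asc (u : List Char) (hch : pvChainD u) (hu : u ≠ []) :
    ∃ a, u = pvAsc a u.length ∧ a + u.length ≤ 10 := by
  have hn1 : 1 ≤ u.length := List.length_pos_iff.mpr hu
  have hstep : ∀ k (hk : k < u.length), (u[k]'hk).toNat = (u[0]'(by omega)).toNat + k := by
    intro k
    induction k with
    | zero => intro _; rfl
    | succ m ihm =>
      intro hm
      have := List.isChain_iff_getElem.mp hch.2 m (by omega)
      rw [this, ihm (by omega)]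
      omega
  have h0 := (pvIsD_iff _).mp (hch.1 _ (List.getElem_mem (show 0 < u.length by omega)))
  have hlastd := (pvIsD_iff _).mp (hch.1 _ (List.getElem_mem (show u.length - 1 < u.length by omega)))
  have hlastv := hstep (u.length - 1) (by omega)
  refine ⟨(u[0]'(by omega)).toNat - 48, ?_, by omega⟩
  refine List.ext_getElem (by rw [pvAsc_length]) ?_
  intro i h1 h2
  simp only [pvAsc, List.getElem_map, List.getElem_range]
  have hv := hstep i h1
  have hiv := (pvIsD_iff _).mp (hch.1 _ (List.getElem_mem h1))
  calc u[i] = Char.ofNat ((u[i]'h1).toNat) := (Char.ofNat_toNat _).symm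
    _ = Char.ofNat (48 + ((u[0]'(by omega)).toNat - 48) + i) := by congr 1; omega

lemma pvAscInfix (i li a la : Nat) (hli : 1 ≤ li) (hla : a + la ≤ 10) (hia : i + li ≤ 10) :
    pvAsc i li <:+: pvAsc a la ↔ a ≤ i ∧ i + li ≤ a + la := by
  constructor
  · intro hinf
    obtain ⟨s, t, hst⟩ := hinf
    rw [List.append_assoc] at hst
    have hlens : s.length + li + t.length = la := by
      have := congrArg List.length hst
      simp only [List.length_append, pvAsc_length] at this
      omega
    have h0 : (pvAsc a la)[s.length]? = some (Char.ofNat (48 + i)) := by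
      rw [← hst]
      rw [List.getElem?_append_right (by omega)]
      have : s.length - s.length = 0 := by omega
      rw [this, List.getElem?_append_left (by rw [pvAsc_length]; omega),
        pvAsc_getElem? i li 0 (by omega)]
      norm_num
    rw [pvAsc_getElem? a la s.length (by omega)] at h0
    have := congrArg (fun o => (Option.getD o 'x').toNat) h0
    simp only [Option.getD_some] at this
    rw [pvChar_toNat_ofNat _ (by omega), pvChar_toNat_ofNat _ (by omega)] at this
    omega
  · rintro ⟨h1, h2⟩
    have heq : pvAsc i li = ((pvAsc a la).drop (i - a)).take li := by
      refine List.ext_getElem ?_ ?_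
      · rw [pvAsc_length, List.length_take, List.length_drop, pvAsc_length]
        omega
      · intro k hk1 hk2
        rw [pvAsc_length] at hk1
        rw [List.getElem_take, List.getElem_drop]
        have hik : i - a + k < la := by omega
        have e1 : (pvAsc i li)[k]? = some (Char.ofNat (48 + i + k)) := pvAsc_getElem? _ _ _ hk1
        have e2 : (pvAsc a la)[i - a + k]? = some (Char.ofNat (48 + a + (i - a + k))) :=
          pvAsc_getElem? _ _ _ hik
        have e3 : (48 : Nat) + a + (i - a + k) = 48 + i + k := by omega
        rw [List.getElem?_eq_getElem (by rw [pvAsc_length]; exact hk1)] at e1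
        rw [List.getElem?_eq_getElem (by rw [pvAsc_length]; omega)] at e2
        rw [e3] at e2
        have := (Option.some.injEq _ _).mp (e1.trans e2.symm)
        exact this
    rw [heq]
    exact ((List.take_prefix _ _).isInfix).trans (List.drop_suffix _ _).isInfix

lemma pvEntry_good (e : Nat × Nat) (hwf : pvWf e) : pvGood (pvEntry e) := by
  obtain ⟨i, j⟩ := e
  obtain ⟨hw1, hw2⟩ := hwf
  have hlen : (j + 1 - i) ≥ 4 := by omega
  refine ⟨pvAsc_ne_nil _ _ (by omega), by simp [pvEntry], ?_, ?_, ?_, ?_⟩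
  · rw [pvEntry, pvAsc_head? _ _ (by omega)]
    rfl
  · rw [pvEntry, pvAsc_last? _ _ (by omega)]
    show some (Char.ofNat (48 + j)) = _
    congr 2
    omega
  · rw [pvEntry, pvAsc_length]
    omega
  · exact pvAsc_chain _ _ (by simp [pvEntry]; omega)

lemma pvWfAll : ∀ e ∈ pvStepsIdx, pvWf e := by decide

lemma pvGoodAll : ∀ pn ∈ pvStepsA, pvGood pn := by
  intro pn hpn
  rw [pvStepsA] at hpn
  obtain ⟨e, he, rfl⟩ := List.mem_map.mp hpn
  exact pvEntry_good e (pvWfAll e he)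

lemma pvF_append (x y : List Char) (hb : pvBnd x y) : pvF (x ++ y) = pvF x ++ pvF y :=
  pvFoldl_append pvStepsA pvGoodAll x y hb

lemma pvF_small (s : List Char) (h : s.length < 4) : pvF s = s :=
  pvFoldl_small pvStepsA (fun pn h' => (pvGoodAll pn h').2.2.2.2.1) s h

set_option maxHeartbeats 1000000 in
lemma pvPairwise : pvStepsIdx.Pairwise pvLexLt := by decide

lemma pvFold_run (a b : Nat) (hwf : pvWf (a, b)) :
    ∀ L : List (Nat × Nat), L.Pairwise pvLexLt → (∀ e ∈ L, pvWf e) → (a, b) ∈ L →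
      (L.map pvEntry).foldl pvStepA (pvAsc a (b + 1 - a)) =
        [Char.ofNat (48 + a), '-', Char.ofNat (48 + b)] := by
  obtain ⟨hw1, hw2⟩ := hwf
  intro L
  induction L with
  | nil => intro _ _ hmem; exact absurd hmem (List.not_mem_nil)
  | cons e L ih =>
    intro hpw hwfall hmem
    obtain ⟨i, j⟩ := e
    have hwe := hwfall (i, j) List.mem_cons_self
    obtain ⟨hwe1, hwe2⟩ := hwe
    simp only [List.map_cons, List.foldl_cons]
    rcases List.mem_cons.mp hmem with heq | hmemtl
    · have hi : i = a := by exact congrArg Prod.fst heq.symm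
      have hj : j = b := by exact congrArg Prod.snd heq.symm
      subst hi; subst hj
      have hstep : pvStepA (pvAsc i (j + 1 - i)) (pvEntry (i, j)) =
          [Char.ofNat (48 + i), '-', Char.ofNat (48 + j)] := by
        rw [pvStepA, if_pos, pvEntry]
        · show PySem.Chars.replace (pvAsc i (j + 1 - i)) (pvAsc i (j + 1 - i)) _ = _
          rw [pvReplace_eq_rep _ _ _ (pvAsc_ne_nil _ _ (by omega)),
            pvRep_self _ _ (pvAsc_ne_nil _ _ (by omega))]
        · exact (PySem.Chars.isIn_iff_infix _ _).mpr List.infix_rfl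
      rw [hstep]
      refine pvFoldl_small _ ?_ _ (by simp)
      intro pn hpn
      obtain ⟨q, hq, rfl⟩ := List.mem_map.mp hpn
      have := hwfall q (List.mem_cons_of_mem _ hq)
      rw [pvEntry, pvAsc_length]
      obtain ⟨hq1, hq2⟩ := this
      omega
    · have hlt : pvLexLt (i, j) (a, b) := (List.pairwise_cons.mp hpw).1 _ hmemtl
      have hstep : pvStepA (pvAsc a (b + 1 - a)) (pvEntry (i, j)) = pvAsc a (b + 1 - a) := by
        rw [pvStepA, if_neg]
        intro hin
        have hinf := (PySem.Chars.isIn_iff_infix _ _).mp hin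
        rw [pvEntry] at hinf
        have := (pvAscInfix i (j + 1 - i) a (b + 1 - a) (by omega) (by omega) (by omega)).mp hinf
        rcases hlt with h | ⟨h1, h2⟩
        · simp only at h; omega
        · simp only at h1 h2; omega
      rw [hstep]
      exact ih (List.pairwise_cons.mp hpw).2
        (fun q hq => hwfall q (List.mem_cons_of_mem _ hq)) hmemtl

lemma pvFlush_asc (a la : Nat) (h4 : 4 ≤ la) (hla : a + la ≤ 10) :
    pvFlush (pvAsc a la) = [Char.ofNat (48 + a), '-', Char.ofNat (48 + a + (la - 1))] := by
  rw [pvFlush, if_pos (by rw [pvAsc_length]; omega)]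
  have h1 := pvAsc_head? a la (by omega)
  have h2 := pvAsc_last? a la (by omega)
  simp [List.headD_eq_head?_getD, List.getLastD_eq_getLast?, h1, h2]

lemma pvF_chain (u : List Char) (hch : pvChainD u) : pvF u = pvFlush u := by
  rcases Decidable.em (u = []) with rfl | hne
  · rw [pvF_small [] (by simp)]
    rfl
  obtain ⟨a, hasc, hbound⟩ := pvChain_eq_asc u hch hne
  have hn1 : 1 ≤ u.length := List.length_pos_iff.mpr hne
  rcases Decidable.em (4 ≤ u.length) with h4 | h4
  · obtain ⟨b, hbdef⟩ : ∃ b, a + u.length - 1 = b := ⟨_, rfl⟩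
    have ha : a ≤ 6 := by omega
    have hb1 : a + 3 ≤ b := by omega
    have hb2 : b ≤ 9 := by omega
    have hmem : (a, b) ∈ pvStepsIdx := by
      interval_cases a <;> interval_cases b <;> decide
    have hlen : b + 1 - a = u.length := by omega
    have := pvFold_run a b ⟨by omega, by omega⟩ pvStepsIdx pvPairwise pvWfAll hmem
    rw [hlen] at this
    rw [pvF, pvStepsA]
    rw [hasc, this, pvFlush_asc a u.length h4 hbound]
    have he : (48 : Nat) + a + (u.length - 1) = 48 + b := by omega
    rw [he]
  · rw [pvF_small u (by omega), pvFlush, if_neg (by omega)]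

def pvGrab (prev : Char) : List Char → List Char × List Char
  | [] => ([], [])
  | c :: t =>
    if pvIsD c && (c.toNat == prev.toNat + 1) then
      ((c :: (pvGrab c t).1), (pvGrab c t).2)
    else ([], c :: t)

lemma pvGrab_append (prev : Char) (t : List Char) :
    (pvGrab prev t).1 ++ (pvGrab prev t).2 = t := by
  fun_induction pvGrab prev t with
  | case1 => rfl
  | case2 p c t hcnd ih => simp only [List.cons_append, ih]
  | case3 p c t hcnd => rfl

lemma pvGrab_len (prev : Char) (t : List Char) : (pvGrab prev t).2.length ≤ t.length := by
  have := congrArg List.length (pvGrab_append prev t)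
  simp only [List.length_append] at this
  omega

def pvBlocks : List Char → List (List Char)
  | [] => []
  | c :: t =>
    if pvIsD c then (c :: (pvGrab c t).1) :: pvBlocks (pvGrab c t).2
    else [c] :: pvBlocks t
termination_by l => l.length
decreasing_by
  · have := pvGrab_len c t
    simp only [List.length_cons]
    omega
  · simp

lemma pvGrab_chain (prev : Char) (t : List Char) (hd : pvIsD prev) :
    pvChainD (prev :: (pvGrab prev t).1) := by
  induction t generalizing prev with
  | nil =>
    refine ⟨?_, by rw [pvGrab]; simp⟩
    intro c hc
    rw [pvGrab] at hc
    simp at hc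
    rw [hc]; exact hd
  | cons c t ih =>
    rw [pvGrab]
    by_cases hc : (pvIsD c && (c.toNat == prev.toNat + 1)) = true
    · rw [if_pos hc]
      simp only [Bool.and_eq_true, beq_iff_eq] at hc
      have := ih c hc.1
      refine ⟨?_, ?_⟩
      · intro x hx
        rcases List.mem_cons.mp hx with rfl | hx'
        · exact hd
        · exact this.1 x hx'
      · exact List.isChain_cons_cons.mpr ⟨hc.2, this.2⟩
    · rw [if_neg hc]
      exact ⟨by intro x hx; simp at hx; rw [hx]; exact hd, by simp⟩

lemma pvGrab_bnd (prev : Char) (t : List Char) :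
    pvBnd (prev :: (pvGrab prev t).1) (pvGrab prev t).2 := by
  induction t generalizing prev with
  | nil =>
    intro c d hc hd _ _
    simp [pvGrab] at hd
  | cons c t ih =>
    rw [pvGrab]
    by_cases hc : (pvIsD c && (c.toNat == prev.toNat + 1)) = true
    · rw [if_pos hc]
      intro x y hx hy hix hiy
      have := ih c
      refine this x y ?_ hy hix hiy
      rw [← hx]
      show _ = (prev :: (c :: (pvGrab c t).1)).getLast?
      rw [show prev :: (c :: (pvGrab c t).1) = [prev] ++ (c :: (pvGrab c t).1) from rfl,
        List.getLast?_append]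
      cases hl : (c :: (pvGrab c t).1).getLast? with
      | none => simp [List.getLast?_eq_none_iff] at hl
      | some z => rfl
    · rw [if_neg hc]
      intro x y hx hy hix hiy
      simp only [List.getLast?_singleton, Option.some.injEq] at hx
      simp only [List.head?_cons, Option.some.injEq] at hy
      subst hx; subst hy
      simp only [Bool.and_eq_true, beq_iff_eq] at hc
      intro heq
      exact hc ⟨hiy, by omega⟩

lemma pvFlush_single (c : Char) : pvFlush [c] = [c] := by
  simp [pvFlush]

lemma pvFlush_nil : pvFlush [] = [] := rfl

lemma pvF_blocks (s : List Char) : pvF s = ((pvBlocks s).map pvFlush).flatten := by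
  fun_induction pvBlocks s with
  | case1 => exact pvF_small [] (by simp)
  | case2 c t hd ih =>
    have hsplit : c :: t = (c :: (pvGrab c t).1) ++ (pvGrab c t).2 := by
      rw [List.cons_append, pvGrab_append]
    rw [hsplit, pvF_append _ _ (pvGrab_bnd c t), pvF_chain _ (pvGrab_chain c t hd), ih]
    simp
  | case3 c t hd ih =>
    have hsplit : c :: t = [c] ++ t := rfl
    have hbnd : pvBnd [c] t := by
      intro x y hx hy hix _
      simp only [List.getLast?_singleton, Option.some.injEq] at hx
      subst hx
      rw [hix] at hd
      simp at hd
    rw [hsplit, pvF_append _ _ hbnd, pvF_small [c] (by simp), ih]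
    simp [pvFlush_single]

def pvFin (st : List (List Char) × List Char) : List Char := (st.1 ++ [pvFlush st.2]).flatten

lemma pvStepB_eval (out : List (List Char)) (run : List Char) (c : Char) :
    pvStepB (out, run) c =
      if pvIsD c && (match run.getLast? with | some d => c.toNat == d.toNat + 1 | none => false)
      then (out, run ++ [c])
      else if pvIsD c then (out ++ [pvFlush run], [c]) else (out ++ [pvFlush run, [c]], []) := rfl

lemma pvStepB_split (out : List (List Char)) (run : List Char) (c : Char) :
    pvStepB (out, run) c =
      (out ++ (pvStepB ([], run) c).1, (pvStepB ([], run) c).2) := by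
  rw [pvStepB, pvStepB]
  by_cases h1 : (pvIsD c && (match run.getLast? with
      | some d => c.toNat == d.toNat + 1 | none => false)) = true
  · rw [if_pos h1, if_pos h1]
    simp
  · rw [if_neg h1, if_neg h1]
    by_cases h2 : pvIsD c = true
    · rw [if_pos h2, if_pos h2]
      simp
    · rw [if_neg h2, if_neg h2]
      simp

lemma pvProcessFrom (s : List Char) :
    ∀ (out : List (List Char)) (run : List Char),
      pvFin (s.foldl pvStepB (out, run)) = out.flatten ++ pvFin (s.foldl pvStepB ([], run)) := by
  induction s with
  | nil =>
    intro out run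
    simp [pvFin]
  | cons c s ih =>
    intro out run
    simp only [List.foldl_cons]
    rw [pvStepB_split]
    rcases hXY : pvStepB ([], run) c with ⟨X, Y⟩
    show pvFin (List.foldl pvStepB (out ++ X, Y) s) = out.flatten ++ pvFin (List.foldl pvStepB (X, Y) s)
    rw [ih (out ++ X) Y, ih X Y]
    simp [List.flatten_append, List.append_assoc]

lemma pvRunProcess (t : List Char) :
    ∀ (run : List Char) (d : Char), run.getLast? = some d →
      pvFin (t.foldl pvStepB ([], run)) =
        pvFlush (run ++ (pvGrab d t).1) ++ pvFin ((pvGrab d t).2.foldl pvStepB ([], [])) := by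
  induction t with
  | nil =>
    intro run d _
    rw [pvGrab]
    simp [pvFin, pvFlush_nil]
  | cons c t ih =>
    intro run d hd
    simp only [List.foldl_cons]
    rw [pvStepB_eval, hd]
    rw [pvGrab]
    by_cases hcond : (pvIsD c && (c.toNat == d.toNat + 1)) = true
    · rw [if_pos hcond, if_pos hcond]
      rw [ih (run ++ [c]) c (by simp)]
      simp only [List.append_assoc, List.singleton_append]
    · rw [if_neg hcond, if_neg hcond]
      by_cases hdg : pvIsD c = true
      · rw [if_pos hdg]
        rw [pvProcessFrom t ([] ++ [pvFlush run]) [c]]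
        have hrhs : pvFin ((c :: t).foldl pvStepB ([], [])) = pvFin (t.foldl pvStepB ([], [c])) := by
          simp only [List.foldl_cons]
          rw [pvStepB_eval]
          simp only [List.getLast?_nil]
          rw [if_neg (by simp), if_pos hdg]
          rw [pvProcessFrom t ([] ++ [pvFlush []]) [c]]
          simp [pvFlush_nil]
        rw [hrhs]
        simp [pvFin, List.append_nil]
      · rw [if_neg hdg]
        rw [pvProcessFrom t ([] ++ [pvFlush run, [c]]) []]
        have hrhs : pvFin ((c :: t).foldl pvStepB ([], [])) =
            [c] ++ pvFin (t.foldl pvStepB ([], [])) := by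
          simp only [List.foldl_cons]
          rw [pvStepB_eval]
          simp only [List.getLast?_nil]
          rw [if_neg (by simp), if_neg hdg]
          rw [pvProcessFrom t ([] ++ [pvFlush [], [c]]) []]
          simp [pvFlush_nil]
        rw [hrhs]
        simp [pvFin, List.append_nil, List.append_assoc]

lemma pvB_blocks (s : List Char) :
    pvFin (s.foldl pvStepB ([], [])) = ((pvBlocks s).map pvFlush).flatten := by
  fun_induction pvBlocks s with
  | case1 => simp [pvFin, pvFlush_nil]
  | case2 c t hd ih =>
    simp only [List.foldl_cons]
    have hstep : pvStepB ([], ([] : List Char)) c = ([[]], [c]) := by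
      rw [pvStepB_eval]
      simp only [List.getLast?_nil]
      rw [if_neg (by simp), if_pos hd]
      simp [pvFlush_nil]
    rw [hstep, pvProcessFrom t [[]] [c], pvRunProcess t [c] c rfl, ih]
    simp
  | case3 c t hd ih =>
    simp only [List.foldl_cons]
    have hstep : pvStepB ([], ([] : List Char)) c = ([[], [c]], []) := by
      rw [pvStepB_eval]
      simp only [List.getLast?_nil]
      rw [if_neg (by simp), if_neg hd]
      simp [pvFlush_nil]
    rw [hstep, pvProcessFrom t [[], [c]] [], ih]
    simp [pvFlush_single]

lemma pvA_final (s : String) : shorten_digits s = String.mk (((pvBlocks s.toList).map pvFlush).flatten) := by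
  rw [pvA_eq, pvF_blocks]


-- ===== VERDICT (by name: the statement is the Claim_ definition above) =====
theorem shorten_digits_spec : Claim_equal_shorten_digits := by
  intro digits _
  show shorten_digits digits = shorten_digits_alt digits
  rw [pvA_final]
  show _ = String.mk (pvFin (digits.toList.foldl pvStepB ([], [])))
  rw [pvB_blocks]
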